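-- pv_equiv track=rewrite | github.com/liusuosuo7/NER-Merged | LinkNER/combination/evaluate_metric.py | get_chunks_onesent
-- ===== SOURCE A (Python) =====
-- def get_chunks_onesent(seq):
--     """从一个句子的标签序列中提取chunks"""
--     prev_tag, prev_type = 'O', ''
--     chunks = []
--     begin_idx = 0
--     for i, chunk in enumerate(seq + ['O']):
--         tag = chunk[0]
--         type_ = chunk.split('-')[-1]
--
--         if end_of_chunk(prev_tag, tag, prev_type, type_):
--             chunks.append((prev_type, begin_idx, i-1))
--         if start_of_chunk(prev_tag, tag, prev_type, type_):
--             begin_idx = i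
--         prev_tag, prev_type = tag, type_
--
--     return chunks
--
-- def end_of_chunk(prev_tag, tag, prev_type, type_):
--     """判断是否为chunk的结束"""
--     chunk_end = False
--
--     if prev_tag == 'E': chunk_end = True
--     if prev_tag == 'S': chunk_end = True
--     if prev_tag == 'B' and tag == 'B': chunk_end = True
--     if prev_tag == 'B' and tag == 'O': chunk_end = True
--     if prev_tag == 'I' and tag == 'B': chunk_end = True
--     if prev_tag == 'I' and tag == 'O': chunk_end = True
--
--     if prev_tag != 'O' and prev_type != type_ and tag == 'I':
--         chunk_end = True
--
--     return chunk_end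
--
-- def start_of_chunk(prev_tag, tag, prev_type, type_):
--     """判断是否为chunk的开始"""
--     chunk_start = False
--
--     if tag == 'B': chunk_start = True
--     if tag == 'S': chunk_start = True
--     if prev_tag == 'O' and tag == 'I': chunk_start = True
--     if tag != 'O' and tag != '.' and prev_type != type_:
--         chunk_start = True
--
--     return chunk_start
-- ===== SOURCE B (Python) =====
-- def get_chunks_onesent(seq):
--     # Staged algorithm: tokenize once, compute the sorted index lists of all
--     # chunk-close events and chunk-open events, then pair each close with the
--     # latest earlier open by a two-pointer merge of the two sorted lists.
--     ext = seq + ['O']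
--     toks = [('O', '')] + [(c[0], c.split('-')[-1]) for c in ext]
--     pairs = list(zip(toks, toks[1:]))
--     opens = [i for i, (p, c) in enumerate(pairs) if is_open(p, c)]
--     closes = [(i, p[1]) for i, (p, c) in enumerate(pairs) if is_close(p, c)]
--     chunks = []
--     j, begin = 0, 0
--     for i, ty in closes:
--         while j < len(opens) and opens[j] < i:
--             begin = opens[j]
--             j += 1
--         chunks.append((ty, begin, i - 1))
--     return chunks
--
-- def is_close(p, c):
--     pt, pty = p
--     t, ty = c
--     return pt in ('E', 'S') or (pt in ('B', 'I') and t in ('B', 'O')) \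
--         or (pt != 'O' and t == 'I' and pty != ty)
--
-- def is_open(p, c):
--     pt, pty = p
--     t, ty = c
--     return t in ('B', 'S') or (pt == 'O' and t == 'I') \
--         or (t not in ('O', '.') and pty != ty)
-- ===== Notes on version B (the rewrite author's own statement) =====
-- stated objective: alternative
-- what changed: A's single stateful pass (mutable prev_tag/prev_type/begin_idx updated per token) is replaced by staged passes: tokenize, compute the sorted index lists of all close events and all open events, then pair each close with the latest earlier open index by a two-pointer merge of the two sorted event lists.
import Mathlib
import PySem

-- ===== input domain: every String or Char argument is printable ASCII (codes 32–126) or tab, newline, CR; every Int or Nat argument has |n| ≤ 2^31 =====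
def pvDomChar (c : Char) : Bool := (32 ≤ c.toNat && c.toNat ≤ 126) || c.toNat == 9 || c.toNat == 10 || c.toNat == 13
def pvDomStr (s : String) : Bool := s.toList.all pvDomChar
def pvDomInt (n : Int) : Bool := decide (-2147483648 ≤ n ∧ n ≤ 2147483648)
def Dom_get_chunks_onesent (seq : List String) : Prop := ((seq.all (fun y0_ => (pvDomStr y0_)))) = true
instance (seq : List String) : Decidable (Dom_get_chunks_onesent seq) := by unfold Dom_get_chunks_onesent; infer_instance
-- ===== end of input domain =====

-- B replaces A's single stateful pass by staged passes: tokenize, collect the sorted index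
-- lists of close events and open events, then pair each close with the latest earlier open
-- by a two-pointer merge of the two sorted lists; objective: alternative.

-- ===== PORT A =====
-- A's end_of_chunk: sequential if-chain setting chunk_end (transliterated as a let-chain).
def pvEndOfChunk (prev_tag tag : Char) (prev_type type_ : String) : Bool :=
  let c := false
  let c := if prev_tag == 'E' then true else c
  let c := if prev_tag == 'S' then true else c
  let c := if prev_tag == 'B' && tag == 'B' then true else c
  let c := if prev_tag == 'B' && tag == 'O' then true else c
  let c := if prev_tag == 'I' && tag == 'B' then true else c
  let c := if prev_tag == 'I' && tag == 'O' then true else c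
  let c := if prev_tag != 'O' && prev_type != type_ && tag == 'I' then true else c
  c

-- A's start_of_chunk: sequential if-chain setting chunk_start.
def pvStartOfChunk (prev_tag tag : Char) (prev_type type_ : String) : Bool :=
  let c := false
  let c := if tag == 'B' then true else c
  let c := if tag == 'S' then true else c
  let c := if prev_tag == 'O' && tag == 'I' then true else c
  let c := if tag != 'O' && tag != '.' && prev_type != type_ then true else c
  c

-- A's loop body: state (prev_tag, prev_type, chunks, begin_idx); chunk[0] is a 1-char str,
-- held as Char; pyGet? none = Python's IndexError on '' (excluded by Pre_; state kept as-is).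
-- chunk.split('-')[-1]: split? is some (sep = "-" ≠ "") and never yields [], so getD/getLastD are exact here.
def pvStepA (st : Char × String × List (String × Int × Int) × Int) (p : Int × String) :
    Char × String × List (String × Int × Int) × Int :=
  let (pt, py, chunks, bg) := st
  match PySem.Str.pyGet? p.2 0 with
  | none => (pt, py, chunks, bg)
  | some tag =>
    let ty := ((PySem.Str.split? p.2 "-").getD []).getLastD ""
    let chunks := if pvEndOfChunk pt tag py ty then chunks ++ [(py, bg, p.1 - 1)] else chunks
    let bg := if pvStartOfChunk pt tag py ty then p.1 else bg
    (tag, ty, chunks, bg)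

def get_chunks_onesent (seq : List String) : List (String × Int × Int) :=
  ((PySem.List.enumerate (seq ++ ["O"])).foldl pvStepA ('O', "", [], 0)).2.2.1

-- ===== PORT B =====
-- B's is_close / is_open boundary predicates on a (prev, cur) token pair.
def pvClose (p c : Char × String) : Bool :=
  (p.1 == 'E' || p.1 == 'S') || ((p.1 == 'B' || p.1 == 'I') && (c.1 == 'B' || c.1 == 'O')) ||
    (p.1 != 'O' && c.1 == 'I' && p.2 != c.2)

def pvOpen (p c : Char × String) : Bool :=
  (c.1 == 'B' || c.1 == 'S') || (p.1 == 'O' && c.1 == 'I') ||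
    (c.1 != 'O' && c.1 != '.' && p.2 != c.2)

-- B's (c[0], c.split('-')[-1]); pyGet? none = IndexError on '' (excluded by Pre_).
def pvTok (c : String) : Char × String :=
  ((PySem.Str.pyGet? c 0).getD ' ', ((PySem.Str.split? c "-").getD []).getLastD "")

-- B's inner while loop: the two-pointer advance over the sorted opens list (the Python
-- pointer j is represented by consuming the list's front), returning the remaining opens
-- and the updated begin.
def pvAdvance : List Int → Int → Int → List Int × Int
  | [], _, b => ([], b)
  | o :: os, i, b => if o < i then pvAdvance os i o else (o :: os, b)

-- B's outer for-loop body over closes: state (chunks, remaining opens, begin).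
def pvMergeStep (st : List (String × Int × Int) × List Int × Int) (e : Int × String) :
    List (String × Int × Int) × List Int × Int :=
  let (os, b) := pvAdvance st.2.1 e.1 st.2.2
  (st.1 ++ [(e.2, b, e.1 - 1)], os, b)

def get_chunks_onesent_alt (seq : List String) : List (String × Int × Int) :=
  let toks := ('O', "") :: (seq ++ ["O"]).map pvTok
  let pairs := PySem.List.enumerate (List.zip toks toks.tail)
  let opens := (pairs.filter (fun e => pvOpen e.2.1 e.2.2)).map (fun e => e.1)
  let closes := (pairs.filter (fun e => pvClose e.2.1 e.2.2)).map (fun e => (e.1, e.2.1.2))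
  (closes.foldl pvMergeStep ([], opens, 0)).1

-- ===== PRECONDITION & SPEC =====
-- Pre_ excludes exactly the sequences containing an empty token, on which A raises IndexError
-- at chunk[0] (B raises there too).
def Pre_get_chunks_onesent (seq : List String) : Prop := ∀ s ∈ seq, s ≠ ""
instance (seq : List String) : Decidable (Pre_get_chunks_onesent seq) := by
  unfold Pre_get_chunks_onesent; infer_instance

def pvWitness_get_chunks_onesent : List String := ["B-PER", "I-PER", "O", "S-LOC"]

def Spec_get_chunks_onesent (seq : List String) (out : List (String × Int × Int)) : Prop := out = get_chunks_onesent_alt seq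
instance (seq : List String) (out : List (String × Int × Int)) : Decidable (Spec_get_chunks_onesent seq out) := by unfold Spec_get_chunks_onesent; infer_instance

-- ===== CLAIM (what is proved, stated in full; the proofs are below) =====
def Claim_equal_get_chunks_onesent : Prop := ∀ (seq : List String), Dom_get_chunks_onesent seq → Pre_get_chunks_onesent seq → Spec_get_chunks_onesent seq (get_chunks_onesent seq)

-- ===== LEMMAS AND PROOFS =====

set_option maxHeartbeats 1000000

-- Canonical event list: one (index, close?, open?, prev_type) record per extended token,
-- and the fused single pass over it; both programs are reduced to this form.
def pvMkEv : Int → (Char × String) → List String → List (Int × Bool × Bool × String)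
  | _, _, [] => []
  | i, p, c :: cs =>
    (i, pvClose p (pvTok c), pvOpen p (pvTok c), p.2) :: pvMkEv (i + 1) (pvTok c) cs

def pvEvStep (st : List (String × Int × Int) × Int) (e : Int × Bool × Bool × String) :
    List (String × Int × Int) × Int :=
  (if e.2.1 then st.1 ++ [(e.2.2.2, st.2, e.1 - 1)] else st.1, if e.2.2.1 then e.1 else st.2)

def pvClosesOf (M : List (Int × Bool × Bool × String)) : List (Int × String) :=
  (M.filter (fun e => e.2.1)).map (fun e => (e.1, e.2.2.2))

def pvOpensOf (M : List (Int × Bool × Bool × String)) : List Int :=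
  (M.filter (fun e => e.2.2.1)).map (fun e => e.1)

-- A's if-chain predicates compute B's boundary disjunctions.
theorem pvEnd_eq (pt t : Char) (py ty : String) :
    pvEndOfChunk pt t py ty = pvClose (pt, py) (t, ty) := by
  simp only [pvEndOfChunk, pvClose]
  split_ifs <;> simp_all
  tauto

theorem pvStart_eq (pt t : Char) (py ty : String) :
    pvStartOfChunk pt t py ty = pvOpen (pt, py) (t, ty) := by
  simp only [pvStartOfChunk, pvOpen]
  split_ifs <;> simp_all

-- A's fold equals the fused event pass.
theorem pvA_ev (cs : List String) :
    ∀ (_ : ∀ c ∈ cs, c ≠ "") (p : Char × String)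
      (chs : List (String × Int × Int)) (bg i : Int),
    ((PySem.List.enumerate cs i).foldl pvStepA (p.1, p.2, chs, bg)).2.2 =
      (pvMkEv i p cs).foldl pvEvStep (chs, bg) := by
  induction cs with
  | nil => intro _ p chs bg i; simp [PySem.List.enumerate, pvMkEv]
  | cons c cs ih =>
    intro h p chs bg i
    have hc : c ≠ "" := h c (List.mem_cons_self ..)
    obtain ⟨tag, htag⟩ : ∃ tag, PySem.Str.pyGet? c 0 = some tag := by
      cases c' : c.toList with
      | nil =>
        exact absurd (by have := congrArg String.ofList c'; simpa using this) hc
      | cons a l => exact ⟨a, by simp [c']⟩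
    have htok : pvTok c = (tag, ((PySem.Str.split? c "-").getD []).getLastD "") := by
      simp only [pvTok, htag, Option.getD_some]
    simp only [PySem.List.enumerate_cons, List.foldl_cons, pvMkEv]
    have hstep : pvStepA (p.1, p.2, chs, bg) (i, c) =
        ((pvTok c).1, (pvTok c).2,
         pvEvStep (chs, bg) (i, pvClose p (pvTok c), pvOpen p (pvTok c), p.2)) := by
      simp only [pvStepA, htag, htok, pvEvStep, pvEnd_eq, pvStart_eq]
    rw [hstep]
    exact ih (fun x hx => h x (List.mem_cons_of_mem _ hx)) (pvTok c) _ _ (i + 1)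

-- Advance consumes exactly the pending opens below i, ending at the last of them.
theorem pvAdvance_eq (pend : List Int) :
    ∀ (rest : List Int) (i b : Int), (∀ x ∈ pend, x < i) → (∀ x ∈ rest, ¬ x < i) →
    pvAdvance (pend ++ rest) i b = (rest, pend.getLastD b) := by
  induction pend with
  | nil =>
    intro rest i b _ h2
    cases rest with
    | nil => simp [pvAdvance]
    | cons r rs => simp [pvAdvance, h2 r (List.mem_cons_self ..)]
  | cons x xs ih =>
    intro rest i b h1 h2
    have hx : x < i := h1 x (List.mem_cons_self ..)
    simp only [List.cons_append, pvAdvance, if_pos hx]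
    rw [ih rest i x (fun y hy => h1 y (List.mem_cons_of_mem _ hy)) h2, List.getLastD_cons]

-- The two-pointer merge over the split event lists equals the fused event pass.
theorem pvMerge_ev (M : List (Int × Bool × Bool × String)) :
    ∀ (pend : List Int) (chs : List (String × Int × Int)) (b : Int),
    (∀ x ∈ pend, ∀ e ∈ M, x < e.1) → (M.map (fun e => e.1)).Pairwise (· < ·) →
    ((pvClosesOf M).foldl pvMergeStep (chs, pend ++ pvOpensOf M, b)).1 =
      (M.foldl pvEvStep (chs, pend.getLastD b)).1 := by
  induction M with
  | nil => intro pend chs b _ _; simp [pvClosesOf, pvOpensOf]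
  | cons e M' ih =>
    intro pend chs b h1 h2
    obtain ⟨i, cl, op, ty⟩ := e
    rw [List.map_cons] at h2
    have hlt : ∀ f ∈ M', i < f.1 := fun f hf =>
      (List.pairwise_cons.1 h2).1 f.1 (List.mem_map_of_mem hf)
    have h2' := (List.pairwise_cons.1 h2).2
    have hpend : ∀ x ∈ pend, x < i := fun x hx => h1 x hx _ (List.mem_cons_self ..)
    have hopmem : ∀ x ∈ pvOpensOf M', i < x := by
      intro x hx
      obtain ⟨f, hf, rfl⟩ := List.mem_map.1 hx
      exact hlt f (List.mem_of_mem_filter hf)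
    have hrest : ∀ x ∈ (if op then [i] else []) ++ pvOpensOf M', ¬ x < i := by
      intro x hx
      rcases List.mem_append.1 hx with hx | hx
      · cases op with
        | false => simp at hx
        | true => simp at hx; omega
      · exact not_lt.2 (le_of_lt (hopmem x hx))
    have hopens : pvOpensOf ((i, cl, op, ty) :: M') =
        (if op then [i] else []) ++ pvOpensOf M' := by
      simp only [pvOpensOf, List.filter_cons]
      cases op <;> simp
    cases cl with
    | true =>
      have hcl : pvClosesOf ((i, true, op, ty) :: M') = (i, ty) :: pvClosesOf M' := by
        simp [pvClosesOf, List.filter_cons]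
      have hadv : pvAdvance (pend ++ ((if op then [i] else []) ++ pvOpensOf M')) i b =
          ((if op then [i] else []) ++ pvOpensOf M', pend.getLastD b) :=
        pvAdvance_eq pend _ i b hpend hrest
      rw [hcl, hopens, List.foldl_cons]
      have hstep : pvMergeStep (chs, pend ++ ((if op then [i] else []) ++ pvOpensOf M'), b)
            (i, ty) =
          (chs ++ [(ty, pend.getLastD b, i - 1)],
           (if op then [i] else []) ++ pvOpensOf M', pend.getLastD b) := by
        simp only [pvMergeStep, hadv]
      rw [hstep]
      have hpend' : ∀ x ∈ (if op then [i] else []), ∀ f ∈ M', x < f.1 := by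
        intro x hx f hf
        cases op with
        | false => simp at hx
        | true => simp at hx; subst hx; exact hlt f hf
      rw [ih (if op then [i] else []) (chs ++ [(ty, pend.getLastD b, i - 1)])
        (pend.getLastD b) hpend' h2']
      have hgl : (if op then [i] else []).getLastD (pend.getLastD b) =
          if op then i else pend.getLastD b := by cases op <;> simp
      rw [hgl]
      simp [pvEvStep]
    | false =>
      have hcl : pvClosesOf ((i, false, op, ty) :: M') = pvClosesOf M' := by
        simp [pvClosesOf, List.filter_cons]
      rw [hcl, hopens, ← List.append_assoc]
      have hpend' : ∀ x ∈ pend ++ (if op then [i] else []), ∀ f ∈ M', x < f.1 := by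
        intro x hx f hf
        rcases List.mem_append.1 hx with hx | hx
        · exact h1 x hx f (List.mem_cons_of_mem _ hf)
        · cases op with
          | false => simp at hx
          | true => simp at hx; subst hx; exact hlt f hf
      rw [ih (pend ++ (if op then [i] else [])) chs b hpend' h2']
      have hgl : (pend ++ (if op then [i] else [])).getLastD b =
          if op then i else pend.getLastD b := by
        cases op with
        | false => simp
        | true => simp [List.getLastD_concat]
      rw [hgl]
      simp [pvEvStep]

-- Indices produced by pvMkEv are ≥ the starting index, hence strictly increasing.
theorem pvMkEv_idx (cs : List String) :
    ∀ (i : Int) (p : Char × String), ∀ e ∈ pvMkEv i p cs, i ≤ e.1 := by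
  induction cs with
  | nil => intro i p e he; simp [pvMkEv] at he
  | cons c cs ih =>
    intro i p e he
    simp only [pvMkEv, List.mem_cons] at he
    rcases he with rfl | he
    · simp
    · have := ih (i + 1) (pvTok c) e he; omega

theorem pvMkEv_pairwise (cs : List String) :
    ∀ (i : Int) (p : Char × String),
    ((pvMkEv i p cs).map (fun e => e.1)).Pairwise (· < ·) := by
  induction cs with
  | nil => intro i p; simp [pvMkEv]
  | cons c cs ih =>
    intro i p
    simp only [pvMkEv, List.map_cons, List.pairwise_cons]
    refine ⟨?_, ih (i + 1) (pvTok c)⟩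
    intro j hj
    obtain ⟨e, he, rfl⟩ := List.mem_map.1 hj
    have := pvMkEv_idx cs (i + 1) (pvTok c) e he; omega

-- B's filtered enumerate-zip pair lists are the split forms of the canonical event list.
theorem pvCloses_eq (cs : List String) :
    ∀ (i : Int) (p : Char × String),
    ((PySem.List.enumerate (List.zip (p :: cs.map pvTok) (cs.map pvTok)) i).filter
        (fun e => pvClose e.2.1 e.2.2)).map (fun e => (e.1, e.2.1.2)) =
      pvClosesOf (pvMkEv i p cs) := by
  induction cs with
  | nil => intro i p; simp [PySem.List.enumerate, pvMkEv, pvClosesOf]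
  | cons c cs ih =>
    intro i p
    simp only [List.map_cons, List.zip_cons_cons, PySem.List.enumerate_cons, pvMkEv,
      pvClosesOf, List.filter_cons]
    cases h : pvClose p (pvTok c) with
    | false => simpa [pvClosesOf] using ih (i + 1) (pvTok c)
    | true =>
      simp only [cond_true, List.map_cons]
      exact congrArg _ (by simpa [pvClosesOf] using ih (i + 1) (pvTok c))

theorem pvOpens_eq (cs : List String) :
    ∀ (i : Int) (p : Char × String),
    ((PySem.List.enumerate (List.zip (p :: cs.map pvTok) (cs.map pvTok)) i).filter
        (fun e => pvOpen e.2.1 e.2.2)).map (fun e => e.1) =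
      pvOpensOf (pvMkEv i p cs) := by
  induction cs with
  | nil => intro i p; simp [PySem.List.enumerate, pvMkEv, pvOpensOf]
  | cons c cs ih =>
    intro i p
    simp only [List.map_cons, List.zip_cons_cons, PySem.List.enumerate_cons, pvMkEv,
      pvOpensOf, List.filter_cons]
    cases h : pvOpen p (pvTok c) with
    | false => simpa [pvOpensOf] using ih (i + 1) (pvTok c)
    | true =>
      simp only [cond_true, List.map_cons]
      exact congrArg _ (by simpa [pvOpensOf] using ih (i + 1) (pvTok c))

-- ===== VERDICT (by name: the statement is the Claim_ definition above) =====
theorem get_chunks_onesent_spec : Claim_equal_get_chunks_onesent := by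
  intro seq _ hpre
  unfold Spec_get_chunks_onesent
  have hall : ∀ c ∈ seq ++ ["O"], c ≠ "" := by
    intro c hcmem
    rcases List.mem_append.1 hcmem with hm | hm
    · exact hpre c hm
    · simp_all
  simp only [get_chunks_onesent, get_chunks_onesent_alt, List.tail_cons]
  rw [pvA_ev (seq ++ ["O"]) hall ('O', "") [] 0 0,
    pvCloses_eq (seq ++ ["O"]) 0 ('O', ""), pvOpens_eq (seq ++ ["O"]) 0 ('O', "")]
  have := pvMerge_ev (pvMkEv 0 ('O', "") (seq ++ ["O"])) [] [] 0 (by simp)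
    (pvMkEv_pairwise (seq ++ ["O"]) 0 ('O', ""))
  simpa using this.symm
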